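-- pv_equiv track=rewrite | github.com/alisha-gursahaney/Algorithms | pa5/greedysolver.py | cost_bakeoff
-- ===== SOURCE A (Python) =====
-- def cost_bakeoff(schedule):
--     elapsed = 0
--     earliest_finish = 0
--     for component in schedule:
--         active = component[0]
--         passive = component[1]
--         elapsed += active
--         earliest_finish = max(earliest_finish, elapsed+passive)
--     return earliest_finish
-- ===== SOURCE B (Python) =====
-- def cost_bakeoff(schedule):
--     # Right-to-left: maintain the best finish of the suffix measured from its
--     # own start (m), shifting it by each active time; no prefix sums kept.
--     m = None
--     for a, p in reversed(schedule):
--         m = a + p if m is None else max(a + p, a + m)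
--     return 0 if m is None else max(0, m)
-- ===== Notes on version B (the rewrite author's own statement) =====
-- stated objective: alternative
-- what changed: Replaces A's forward loop carrying a running prefix sum (elapsed) and a global max by a backward traversal with a different recurrence: it maintains only the suffix's best finish relative to its own start (best = max(a+p, a+best)), shifting it by each active time, with Option/None for the empty suffix and a final max(0, .).
import Mathlib
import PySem

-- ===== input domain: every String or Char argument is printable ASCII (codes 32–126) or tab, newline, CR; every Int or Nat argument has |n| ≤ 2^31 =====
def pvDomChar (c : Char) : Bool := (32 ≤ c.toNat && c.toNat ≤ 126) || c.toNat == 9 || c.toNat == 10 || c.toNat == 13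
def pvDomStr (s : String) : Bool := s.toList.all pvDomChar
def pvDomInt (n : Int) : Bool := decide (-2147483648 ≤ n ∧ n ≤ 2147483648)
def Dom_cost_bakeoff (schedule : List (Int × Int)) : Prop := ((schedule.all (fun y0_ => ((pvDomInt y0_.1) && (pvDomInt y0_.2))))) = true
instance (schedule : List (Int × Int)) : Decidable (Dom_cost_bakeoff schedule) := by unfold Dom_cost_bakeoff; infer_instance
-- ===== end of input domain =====

-- B replaces A's forward loop (running prefix sum + global max) by a backward
-- traversal with the recurrence best = max(a+p, a+best) on the suffix
-- (objective: alternative recurrence; same O(n) cost).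

-- ===== PORT A =====
-- A: one forward loop carrying (elapsed, earliest_finish)
def cost_bakeoff (schedule : List (Int × Int)) : Int :=
  (schedule.foldl
    (fun (s : Int × Int) component =>
      (s.1 + component.1, max s.2 (s.1 + component.1 + component.2)))
    (0, 0)).2

-- ===== PORT B =====
-- B: loop over reversed(schedule), m = a+p if m is None else max(a+p, a+m);
-- finally 0 if m is None else max(0, m)
def cost_bakeoff_alt (schedule : List (Int × Int)) : Int :=
  let m := schedule.reverse.foldl
    (fun (m : Option Int) c =>
      some (match m with
            | none => c.1 + c.2
            | some v => max (c.1 + c.2) (c.1 + v))) none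
  match m with
  | none => 0
  | some v => max 0 v

-- ===== PRECONDITION & SPEC =====
def Spec_cost_bakeoff (schedule : List (Int × Int)) (out : Int) : Prop := out = cost_bakeoff_alt schedule
instance (schedule : List (Int × Int)) (out : Int) : Decidable (Spec_cost_bakeoff schedule out) := by unfold Spec_cost_bakeoff; infer_instance

-- ===== CLAIM =====
def Claim_equal_cost_bakeoff : Prop := ∀ (schedule : List (Int × Int)), Dom_cost_bakeoff schedule → Spec_cost_bakeoff schedule (cost_bakeoff schedule)

-- ===== LEMMAS AND PROOFS =====

-- B's step function, named for the induction
def pvStep (m : Option Int) (c : Int × Int) : Option Int :=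
  some (match m with
        | none => c.1 + c.2
        | some v => max (c.1 + c.2) (c.1 + v))

-- A's fold equals "max f (e + suffix-best)", where the suffix-best is B's foldr
theorem pvKey : ∀ (xs : List (Int × Int)) (e f : Int),
    (xs.foldl
      (fun (s : Int × Int) component =>
        (s.1 + component.1, max s.2 (s.1 + component.1 + component.2)))
      (e, f)).2
      = (match xs.foldr (fun c m => pvStep m c) none with
         | none => f
         | some v => max f (e + v)) := by
  intro xs
  induction xs with
  | nil => intro e f; rfl
  | cons c cs ih =>
      intro e f
      simp only [List.foldl, List.foldr]
      rw [ih (e + c.1) (max f (e + c.1 + c.2))]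
      cases h : cs.foldr (fun c m => pvStep m c) none with
      | none => simp only [h, pvStep]; rw [add_assoc]
      | some v => simp only [h, pvStep]; rw [max_assoc, add_assoc, add_assoc, max_add_add_left]

-- ===== VERDICT =====
theorem cost_bakeoff_spec : Claim_equal_cost_bakeoff := by
  intro schedule _
  unfold Spec_cost_bakeoff cost_bakeoff cost_bakeoff_alt
  rw [List.foldl_reverse, pvKey schedule 0 0]
  cases h : schedule.foldr (fun c m => pvStep m c) none with
  | none => simp [pvStep] at h ⊢; rw [h]
  | some v => simp [pvStep] at h ⊢; rw [h]
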